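-- pv_equiv track=rewrite | github.com/compmec/nurbs | src/compmec/nurbs/heavy.py | is_valid_vector
-- ===== SOURCE A (Python) =====
-- from typing import Tuple, Union
--
-- def is_valid_vector(knotvector: Tuple[float]) -> bool:
--     if isinstance(knotvector, (dict, str)):
--         return False
--     try:
--         knotvector = tuple(knotvector)
--         for knot in knotvector:
--             float(knot)
--         assert knotvector[0] != knotvector[-1]
--         for i in range(len(knotvector) - 1):
--             assert knotvector[i] <= knotvector[i + 1]
--         degree = 0
--         while knotvector[degree] == knotvector[degree + 1]:
--             degree += 1
--         for knot in sorted(knotvector):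
--             count = knotvector.count(knot)
--             assert count <= degree + 1
--         assert count == degree + 1
--         return True
--     except TypeError:
--         return False
--     except IndexError:
--         return False
--     except AssertionError:
--         return False
-- ===== SOURCE B (Python) =====
-- def is_valid_vector(knotvector):
--     if isinstance(knotvector, (dict, str)):
--         return False
--     kv = list(knotvector)
--     if len(kv) < 2 or kv[0] == kv[-1]:
--         return False
--     prev = kv[0]
--     run = 1
--     first_mult = None
--     for k in kv[1:]:
--         if k == prev:
--             run += 1
--         elif k > prev:
--             f = run if first_mult is None else first_mult
--             if run > f:
--                 return False
--             prev, run, first_mult = k, 1, f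
--         else:
--             return False
--     return first_mult is not None and run == first_mult
-- ===== Notes on version B (the rewrite author's own statement) =====
-- stated objective: alternative
-- what changed: replaces the pass that calls tuple.count for every knot (after an extra sort) by a single left-to-right pass that counts consecutive equal runs, comparing each run length to the first run's length
import Mathlib
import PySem

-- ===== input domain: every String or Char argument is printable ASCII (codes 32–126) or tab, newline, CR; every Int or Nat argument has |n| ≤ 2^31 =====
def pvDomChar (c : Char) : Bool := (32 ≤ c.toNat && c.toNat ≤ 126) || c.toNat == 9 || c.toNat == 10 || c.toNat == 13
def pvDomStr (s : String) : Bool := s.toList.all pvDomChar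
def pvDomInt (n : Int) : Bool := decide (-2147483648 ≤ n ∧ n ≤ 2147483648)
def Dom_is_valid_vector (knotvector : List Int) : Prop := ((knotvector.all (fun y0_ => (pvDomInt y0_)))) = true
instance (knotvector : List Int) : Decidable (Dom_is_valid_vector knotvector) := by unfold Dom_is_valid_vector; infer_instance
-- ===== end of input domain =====

-- B validates the knot vector in a single pass over consecutive equal runs instead of
-- A's per-knot tuple.count scan over a sorted copy; same result on every list of ints.


-- ===== PORT A =====
-- 'for i in range(len(kv)-1): assert kv[i] <= kv[i+1]' as the obvious adjacent-pair recursion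
def sortedCheck : List Int → Bool
  | x :: y :: r => decide (x ≤ y) && sortedCheck (y :: r)
  | _ => true

-- 'degree = 0; while kv[degree] == kv[degree+1]: degree += 1'; none = IndexError (caught → False)
def degreeLoop : List Int → Option Int
  | x :: y :: r => if x = y then (degreeLoop (y :: r)).map (· + 1) else some 0
  | _ => none

def is_valid_vector (knotvector : List Int) : Bool :=
  match PySem.List.pyGet? knotvector 0, PySem.List.pyGet? knotvector (-1) with
  | some a, some b =>
    if a = b then false
    else if sortedCheck knotvector then
      match degreeLoop knotvector with
      | some degree =>
        -- 'for knot in sorted(kv): count = kv.count(knot); assert count <= degree+1'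
        -- (the state's second component is Python's 'count' variable; kv is nonempty here,
        -- so the initial 0 is always overwritten before the final 'assert count == degree+1')
        let r := (PySem.List.sorted knotvector (fun x => x) false).foldl
          (fun (st : Bool × Int) knot =>
            (st.1 && decide ((PySem.List.count knotvector knot : Int) ≤ degree + 1),
             (PySem.List.count knotvector knot : Int)))
          (true, 0)
        r.1 && decide (r.2 = degree + 1)
      | none => false
    else false
  | _, _ => false

-- ===== PORT B =====
-- the single pass of Source B: prev/run = current run, fm = multiplicity of the first knot (None until the first run ends)
def loopB (prev : Int) (run : Nat) (fm : Option Nat) : List Int → Bool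
  | [] => fm == some run
  | k :: rest =>
    if k = prev then loopB prev (run + 1) fm rest
    else if prev < k then
      let f := fm.getD run
      if run > f then false else loopB k 1 (some f) rest
    else false

def is_valid_vector_alt (knotvector : List Int) : Bool :=
  match knotvector with
  | x :: y :: rest =>
    match (y :: rest).getLast? with
    | some l => if x = l then false else loopB x 1 none (y :: rest)
    | none => false
  | _ => false

-- ===== PRECONDITION & SPEC =====
def Spec_is_valid_vector (knotvector : List Int) (out : Bool) : Prop := out = is_valid_vector_alt knotvector
instance (knotvector : List Int) (out : Bool) : Decidable (Spec_is_valid_vector knotvector out) := by unfold Spec_is_valid_vector; infer_instance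

-- ===== CLAIM (what is proved, stated in full; the proofs are below) =====
def Claim_equal_is_valid_vector : Prop := ∀ (knotvector : List Int), Dom_is_valid_vector knotvector → Spec_is_valid_vector knotvector (is_valid_vector knotvector)

-- ===== LEMMAS AND PROOFS =====

-- what loopB computes on a sorted suffix, as a proposition about counts
def SpecB (prev : Int) (run : Nat) (fm : Option Nat) (rest : List Int) : Prop :=
  (fm = none → ∃ v ∈ rest, v ≠ prev) ∧
  (∀ v ∈ rest, v ≠ prev → rest.count v ≤ fm.getD (run + rest.count prev)) ∧
  (run + rest.count prev ≤ fm.getD (run + rest.count prev)) ∧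
  ((if rest.getLast?.getD prev = prev then run + rest.count prev else rest.count (rest.getLast?.getD prev))
     = fm.getD (run + rest.count prev))

lemma sortedCheck_iff (l : List Int) : sortedCheck l = true ↔ l.IsChain (· ≤ ·) := by
  induction l with
  | nil => simp [sortedCheck]
  | cons x t ih =>
    cases t with
    | nil => simp [sortedCheck]
    | cons y r => simp [sortedCheck, List.isChain_cons_cons, ih]

lemma degreeLoop_sorted (tail : List Int) (x : Int)
    (hs : (x :: tail).Pairwise (· ≤ ·)) (he : ∃ z ∈ tail, x ≠ z) :
    degreeLoop (x :: tail) = some (((x :: tail).count x : Int) - 1) := by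
  induction tail generalizing x with
  | nil => obtain ⟨z, hz, _⟩ := he; simp at hz
  | cons y r ih =>
    have hxy' : x ≤ y := (List.pairwise_cons.mp hs).1 y (by simp)
    have hpyr : (y :: r).Pairwise (· ≤ ·) := (List.pairwise_cons.mp hs).2
    by_cases hxy : x = y
    · subst hxy
      have hs' : (x :: r).Pairwise (· ≤ ·) := List.Pairwise.sublist (by simp) hs
      have he' : ∃ z ∈ r, x ≠ z := by
        obtain ⟨z, hz, hne⟩ := he
        rcases List.mem_cons.mp hz with h | h
        · exact absurd h.symm hne
        · exact ⟨z, h, hne⟩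
      have ih' := ih x hs' he'
      simp only [degreeLoop, ih', Option.map_some]
      have hc : (x :: x :: r).count x = (x :: r).count x + 1 := by simp
      rw [hc]
      rw [if_pos trivial]
      congr 1
      push_cast
      ring
    · have hyall : ∀ z ∈ y :: r, y ≤ z := by
        intro z hz
        rcases List.mem_cons.mp hz with h | h
        · exact h ▸ le_rfl
        · exact (List.pairwise_cons.mp hpyr).1 z h
      have h0 : (y :: r).count x = 0 := by
        refine List.count_eq_zero.mpr (fun hmem => ?_)
        exact absurd (hyall x hmem) (not_le.mpr (lt_of_le_of_ne hxy' hxy))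
      have hc : (x :: y :: r).count x = 1 := by simp [h0]
      simp only [degreeLoop, if_neg hxy, hc]
      norm_num

lemma foldl_flag_last (g : Int → Int) (P : Int → Bool) :
    ∀ (s : List Int) (hn : s ≠ []) (b : Bool) (c : Int),
      s.foldl (fun (st : Bool × Int) knot => (st.1 && P knot, g knot)) (b, c)
        = (b && s.all P, g (s.getLast hn)) := by
  intro s
  induction s with
  | nil => intro hn; exact absurd rfl hn
  | cons x t ih =>
    intro hn b c
    cases t with
    | nil => simp [List.foldl, List.all]
    | cons y r =>
      rw [List.foldl_cons, ih (by simp)]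
      simp [List.getLast, Bool.and_assoc]

lemma loopB_unsorted : ∀ (rest : List Int) (prev : Int) (run : Nat) (fm : Option Nat),
    ¬ (prev :: rest).IsChain (· ≤ ·) → loopB prev run fm rest = false := by
  intro rest
  induction rest with
  | nil => intro prev run fm h; exact absurd (by simp) h
  | cons k r ih =>
    intro prev run fm h
    rw [List.isChain_cons_cons] at h
    push Not at h
    by_cases hk : k = prev
    · subst hk
      simp only [loopB, if_true]
      exact ih k (run+1) fm (fun hc => h le_rfl hc)
    · by_cases hlt : prev < k
      · have hc : ¬ (k :: r).IsChain (· ≤ ·) := fun hc => h (le_of_lt hlt) hc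
        simp only [loopB, if_neg hk, if_pos hlt]
        split
        · rfl
        · exact ih k 1 _ hc
      · simp [loopB, hk, hlt]

lemma loopB_sorted : ∀ (rest : List Int) (prev : Int) (run : Nat) (fm : Option Nat),
    (prev :: rest).Pairwise (· ≤ ·) →
    (loopB prev run fm rest = true ↔ SpecB prev run fm rest) := by
  intro rest
  induction rest with
  | nil =>
    intro prev run fm _
    cases fm with
    | none => simp [loopB, SpecB]
    | some g => simp [loopB, SpecB]; omega
  | cons k r ih =>
    intro prev run fm hs
    have hpk : prev ≤ k := (List.pairwise_cons.mp hs).1 k (by simp)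
    have hkr : (k :: r).Pairwise (· ≤ ·) := (List.pairwise_cons.mp hs).2
    have hkall : ∀ z ∈ r, k ≤ z := (List.pairwise_cons.mp hkr).1
    by_cases hk : k = prev
    · subst hk
      have hloop : loopB k run fm (k :: r) = loopB k (run + 1) fm r := by simp [loopB]
      rw [hloop, ih k (run + 1) fm hkr]
      unfold SpecB
      have hcnt : (k :: r).count k = r.count k + 1 := by simp
      have hgl : (k :: r).getLast?.getD k = r.getLast?.getD k := by cases r <;> simp
      simp only [hcnt, hgl]
      have harith : run + (r.count k + 1) = run + 1 + r.count k := by omega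
      rw [harith]
      refine and_congr (imp_congr Iff.rfl ?_) (and_congr ?_ (and_congr Iff.rfl ?_))
      · constructor
        · rintro ⟨v, hv, hne⟩; exact ⟨v, List.mem_cons_of_mem _ hv, hne⟩
        · rintro ⟨v, hv, hne⟩
          rcases List.mem_cons.mp hv with h | h
          · exact absurd h hne
          · exact ⟨v, h, hne⟩
      · constructor
        · intro h v hv hne
          rcases List.mem_cons.mp hv with h' | h'
          · exact absurd h' hne
          · rw [List.count_cons_of_ne (Ne.symm hne)]; exact h v h' hne
        · intro h v hv hne
          have := h v (List.mem_cons_of_mem _ hv) hne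
          rwa [List.count_cons_of_ne (Ne.symm hne)] at this
      · by_cases hL : r.getLast?.getD k = k
        · simp [hL]
        · simp only [if_neg hL, List.count_cons_of_ne (Ne.symm hL)]
    · have hlt : prev < k := lt_of_le_of_ne hpk (Ne.symm hk)
      have hmem_gt : ∀ v ∈ k :: r, prev < v := by
        intro v hv
        rcases List.mem_cons.mp hv with h | h
        · exact h ▸ hlt
        · exact lt_of_lt_of_le hlt (hkall v h)
      have hcnt0 : (k :: r).count prev = 0 :=
        List.count_eq_zero.mpr (fun hmem => absurd (hmem_gt prev hmem) (lt_irrefl prev))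
      have hLmem : r.getLast?.getD k ∈ k :: r := by
        cases r with
        | nil => simp
        | cons a s =>
          rw [List.getLast?_eq_some_getLast (l := a :: s) (by simp)]
          exact List.mem_cons_of_mem _ (List.getLast_mem _)
      have hLne : r.getLast?.getD k ≠ prev := ne_of_gt (hmem_gt _ hLmem)
      have hgl : (k :: r).getLast?.getD prev = r.getLast?.getD k := by
        cases r with
        | nil => simp
        | cons a s =>
          rw [List.getLast?_cons_cons, List.getLast?_eq_some_getLast (l := a :: s) (by simp)]
          simp
      have hloop : loopB prev run fm (k :: r) =
          if run > fm.getD run then false else loopB k 1 (some (fm.getD run)) r := by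
        simp [loopB, hk, hlt]
      by_cases hgt : run > fm.getD run
      · rw [hloop, if_pos hgt]
        unfold SpecB
        simp only [hcnt0, Nat.add_zero]
        constructor
        · intro h; exact absurd h (by simp)
        · rintro ⟨-, -, h3, -⟩; exact absurd h3 (by omega)
      · rw [hloop, if_neg hgt, ih k 1 (some (fm.getD run)) hkr]
        unfold SpecB
        simp only [hcnt0, Nat.add_zero, Option.getD_some, hgl, if_neg hLne]
        constructor
        · rintro ⟨-, h2, h3, h4⟩
          refine ⟨fun _ => ⟨k, by simp, hk⟩, ?_, by omega, ?_⟩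
          · intro v hv hvne
            by_cases hvk : v = k
            · subst hvk; rw [List.count_cons_self]; omega
            · rcases List.mem_cons.mp hv with h' | h'
              · exact absurd h' hvk
              · rw [List.count_cons_of_ne (Ne.symm hvk)]; exact h2 v h' hvk
          · by_cases hL : r.getLast?.getD k = k
            · rw [hL, List.count_cons_self]
              rw [if_pos hL] at h4
              omega
            · rw [List.count_cons_of_ne (Ne.symm hL)]
              rw [if_neg hL] at h4
              exact h4
        · rintro ⟨-, h2, -, h4⟩
          refine ⟨fun h => absurd h (by simp), ?_, ?_, ?_⟩
          · intro v hv hvne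
            have := h2 v (List.mem_cons_of_mem _ hv)
              (ne_of_gt (hmem_gt v (List.mem_cons_of_mem _ hv)))
            rwa [List.count_cons_of_ne (Ne.symm hvne)] at this
          · have := h2 k (by simp) hk
            rw [List.count_cons_self] at this
            omega
          · by_cases hL : r.getLast?.getD k = k
            · rw [if_pos hL]
              rw [hL, List.count_cons_self] at h4
              omega
            · rw [if_neg hL]
              rw [List.count_cons_of_ne (Ne.symm hL)] at h4
              exact h4

-- the top-level reading of SpecB for B's actual call
lemma SpecB_top (x : Int) (t : List Int) (ht : t ≠ [])
    (hs : (x :: t).Pairwise (· ≤ ·)) (hxl : x ≠ t.getLast ht) :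
    SpecB x 1 none t ↔
      ((∀ v ∈ x :: t, (x :: t).count v ≤ (x :: t).count x) ∧
       (x :: t).count (t.getLast ht) = (x :: t).count x) := by
  have hlx : t.getLast ht ≠ x := Ne.symm hxl
  have hlast : t.getLast?.getD x = t.getLast ht := by
    rw [List.getLast?_eq_some_getLast (l := t) ht]
    rfl
  unfold SpecB
  simp only [Option.getD_none, hlast, if_neg hlx]
  constructor
  · rintro ⟨-, h2, -, h4⟩
    constructor
    · intro v hv
      rcases List.mem_cons.mp hv with h | h
      · subst h; exact le_refl _
      · by_cases hvx : v = x
        · subst hvx; exact le_refl _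
        · rw [List.count_cons_of_ne (Ne.symm hvx), List.count_cons_self]
          have := h2 v h hvx
          omega
    · rw [List.count_cons_of_ne (Ne.symm hlx), List.count_cons_self]
      omega
  · rintro ⟨h2, h4⟩
    rw [List.count_cons_of_ne (Ne.symm hlx), List.count_cons_self] at h4
    refine ⟨fun _ => ⟨t.getLast ht, List.getLast_mem ht, hlx⟩, ?_, le_refl _, ?_⟩
    · intro v hv hvx
      have := h2 v (List.mem_cons_of_mem _ hv)
      rw [List.count_cons_of_ne (Ne.symm hvx), List.count_cons_self] at this
      omega
    · omega

-- A's value in the sorted, distinct-endpoint case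
lemma A_sorted_char (x : Int) (t : List Int) (ht : t ≠ [])
    (hs : (x :: t).Pairwise (· ≤ ·)) (hxl : x ≠ t.getLast ht) :
    (is_valid_vector (x :: t) = true ↔
      ((∀ v ∈ x :: t, (x :: t).count v ≤ (x :: t).count x) ∧
       (x :: t).count (t.getLast ht) = (x :: t).count x)) := by
  have hl2 : (x :: t).getLast? = some (t.getLast ht) := by
    cases t with
    | nil => exact absurd rfl ht
    | cons b u =>
      rw [List.getLast?_cons_cons, List.getLast?_eq_some_getLast (l := b :: u) (by simp)]
  have hsc : sortedCheck (x :: t) = true :=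
    (sortedCheck_iff _).mpr (List.isChain_iff_pairwise.mpr hs)
  have hdeg := degreeLoop_sorted t x hs ⟨t.getLast ht, List.getLast_mem ht, hxl⟩
  have hss : PySem.List.sorted (x :: t) (fun v => v) false = x :: t :=
    PySem.List.sorted_eq_self_of_pairwise (x :: t) (fun v => v) hs
  have hgl : (x :: t).getLast (by simp) = t.getLast ht := List.getLast_cons ht
  rw [is_valid_vector, PySem.List.pyGet?_zero_cons, PySem.List.pyGet?_neg_one, hl2]
  simp only [if_neg hxl, hsc, if_true, hdeg, hss]
  rw [foldl_flag_last (fun knot => (PySem.List.count (x :: t) knot : Int))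
        (fun knot => decide ((PySem.List.count (x :: t) knot : Int) ≤ (((x :: t).count x : Int) - 1) + 1))
        (x :: t) (by simp) true 0]
  simp only [hgl, Bool.true_and, Bool.and_eq_true, List.all_eq_true, decide_eq_true_eq,
    PySem.List.count_eq]
  constructor
  · rintro ⟨h1, h2⟩
    refine ⟨fun v hv => ?_, ?_⟩
    · have := h1 v hv; omega
    · omega
  · rintro ⟨h1, h2⟩
    refine ⟨fun v hv => ?_, ?_⟩
    · have := h1 v hv
      have : ((x :: t).count v : Int) ≤ ((x :: t).count x : Int) := by exact_mod_cast this
      omega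
    · omega

-- ===== VERDICT (by name: the statement is the Claim_ definition above) =====
theorem is_valid_vector_spec : Claim_equal_is_valid_vector := by
  unfold Claim_equal_is_valid_vector
  intro kv _
  unfold Spec_is_valid_vector
  match kv with
  | [] => rfl
  | [x] =>
    have h1 : PySem.List.pyGet? [x] 0 = some x := PySem.List.pyGet?_zero_cons x [] 
    have h2 : PySem.List.pyGet? [x] (-1) = some x := by
      rw [PySem.List.pyGet?_neg_one]; rfl
    simp [is_valid_vector, is_valid_vector_alt, h2]
  | x :: y :: rest =>
    have ht : (y :: rest) ≠ [] := by simp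
    have hl : (y :: rest).getLast? = some ((y :: rest).getLast ht) :=
      List.getLast?_eq_some_getLast ht
    by_cases hxl : x = (y :: rest).getLast ht
    · have hA : is_valid_vector (x :: y :: rest) = false := by
        rw [is_valid_vector, PySem.List.pyGet?_zero_cons, PySem.List.pyGet?_neg_one,
          List.getLast?_cons_cons, hl]
        simp [hxl]
      have hB : is_valid_vector_alt (x :: y :: rest) = false := by
        rw [is_valid_vector_alt, hl]
        simp [hxl]
      rw [hA, hB]
    · by_cases hsort : (x :: y :: rest).Pairwise (· ≤ ·)
      · have hA := A_sorted_char x (y :: rest) ht hsort hxl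
        have hl2 : (x :: y :: rest).getLast? = some ((y :: rest).getLast ht) := by
          rw [List.getLast?_cons_cons, hl]
        have hBalt : is_valid_vector_alt (x :: y :: rest) = loopB x 1 none (y :: rest) := by
          rw [is_valid_vector_alt, hl]
          simp [hxl]
        rw [Bool.eq_iff_iff, hA, hBalt, loopB_sorted (y :: rest) x 1 none hsort,
          SpecB_top x (y :: rest) ht hsort hxl]
      · have hsc : sortedCheck (x :: y :: rest) = false :=
          Bool.eq_false_iff.mpr
            (fun h => hsort (List.isChain_iff_pairwise.mp ((sortedCheck_iff _).mp h)))
        have hA : is_valid_vector (x :: y :: rest) = false := by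
          rw [is_valid_vector, PySem.List.pyGet?_zero_cons, PySem.List.pyGet?_neg_one,
            List.getLast?_cons_cons, hl]
          simp [hxl, hsc]
        have hB : is_valid_vector_alt (x :: y :: rest) = false := by
          have hlb := loopB_unsorted (y :: rest) x 1 none
            (fun hch => hsort (List.isChain_iff_pairwise.mp hch))
          rw [is_valid_vector_alt, hl]
          simp [hxl, hlb]
        rw [hA, hB]
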